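-- pv_equiv track=rewrite | github.com/rjsengar/leetcode | Easy/Frequency Game/frequency-game.py | LargButMinFreq
-- ===== SOURCE A (Python) =====
-- def LargButMinFreq(arr,n):
--     m=max(arr)
--     s=len(arr)
--     m1=min(arr)
--     d={}
--     for i in arr:
--         if i in d:
--             d[i]+=1
--         else:
--             d[i]=1
--     k=min(d.values())
--     for i in arr:
--         if d[i]==k:
--             if m1<i:
--                 m1=i
--
--     return m1
-- ===== SOURCE B (Python) =====
-- def LargButMinFreq(arr, n):
--     s = sorted(arr)
--     best = None
--     i = 0
--     while i < len(s):
--         v = s[i]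
--         j = i + 1
--         while j < len(s) and s[j] == v:
--             j += 1
--         run = j - i
--         if best is None or run <= best[1]:
--             best = (v, run)
--         i = j
--     if best is None:
--         raise ValueError("LargButMinFreq() arg is an empty sequence")
--     return best[0]
-- ===== Notes on version B (the rewrite author's own statement) =====
-- stated objective: alternative
-- what changed: A counts frequencies in a dict (with separate max/min passes, a min over dict values and a rescan of arr); B uses no dictionary at all: it sorts a copy of arr and makes one pass over the sorted list grouping equal consecutive values into runs, keeping the run of minimal length (on ties the later run wins, which in sorted order is the larger value).
-- outside the precondition, e.g. on LargButMinFreq([], 0): A raises ValueError, B raises ValueError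
import Mathlib
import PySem

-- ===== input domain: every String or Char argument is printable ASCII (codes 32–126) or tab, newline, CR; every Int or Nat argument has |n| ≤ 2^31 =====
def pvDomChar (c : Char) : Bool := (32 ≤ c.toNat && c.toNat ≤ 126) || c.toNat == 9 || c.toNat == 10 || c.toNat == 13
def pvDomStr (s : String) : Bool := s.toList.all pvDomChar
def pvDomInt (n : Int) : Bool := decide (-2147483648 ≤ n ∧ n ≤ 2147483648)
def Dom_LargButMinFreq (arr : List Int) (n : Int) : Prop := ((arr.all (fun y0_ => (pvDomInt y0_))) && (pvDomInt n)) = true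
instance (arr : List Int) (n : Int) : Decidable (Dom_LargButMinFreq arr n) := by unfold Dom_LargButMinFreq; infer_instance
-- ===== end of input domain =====

-- B replaces A's dict-counting (plus max/min passes and a rescan of arr) by sorting a copy of arr
-- and scanning equal-value runs once, keeping the shortest run (ties -> later, i.e. larger, value);
-- objective: alternative algorithm, same return value.

-- ===== PORT A =====
-- Literal port of A.  max(arr)/min(arr)/min(d.values()) raise ValueError on [], so [] is excluded
-- by Pre_ (the 'none' branches below are unreachable under Pre_).  'd[i]' in the second loop is
-- ported as 'getD i 0': every i there is a key of d, so this is exact.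
def LargButMinFreq (arr : List Int) (n : Int) : Int :=
  match PySem.List.max? arr (fun v => v) with
  | none => 0
  | some _m =>
    let _s : Int := arr.length
    match PySem.List.min? arr (fun v => v) with
    | none => 0
    | some m1 =>
      let d := arr.foldl
        (fun d i => if d.contains i then d.modify i 0 (· + 1) else d.insert i 1)
        (PySem.Dict.empty : PySem.Dict Int Int)
      match PySem.List.min? d.values (fun v => v) with
      | none => 0
      | some k =>
        arr.foldl (fun m1 i => if d.getD i 0 == k then (if m1 < i then i else m1) else m1) m1

-- ===== PORT B =====
-- Inner while loop of Source B: with the remaining suffix s[i:] = v :: t, 'j - i' ends as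
-- 1 + countRun v t (one plus the number of further leading elements of t equal to v).
def countRun (v : Int) : List Int → Nat
  | [] => 0
  | x :: t => if x == v then countRun v t + 1 else 0

-- Outer while loop of Source B, transcribed on the remaining suffix s[i:]: advancing 'i = j'
-- past the leading run (run ≥ 1 elements) is the 'List.drop run' recursive call.
def scanB : List Int → Option (Int × Int) → Option (Int × Int)
  | [], best => best
  | v :: t, best =>
    let run : Nat := 1 + countRun v t
    let best' : Option (Int × Int) :=
      match best with
      | none => some (v, (run : Int))
      | some q => if (run : Int) ≤ q.2 then some (v, (run : Int)) else some q
    scanB ((v :: t).drop run) best'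
termination_by s => s.length
decreasing_by
  simp only [List.length_drop, List.length_cons]
  omega

-- Literal port of Source B.  'best is None' after the loop means arr = []: the Python raises
-- ValueError there (excluded by Pre_), the port's 'none' branch returns 0.
def LargButMinFreq_alt (arr : List Int) (n : Int) : Int :=
  match scanB (PySem.List.sorted arr (fun x => x) false) none with
  | none => 0
  | some q => q.1

-- ===== PRECONDITION & SPEC =====
-- Pre_ excludes only the empty list, on which A raises ValueError (max() of an empty sequence)
-- and B raises ValueError too.
def Pre_LargButMinFreq (arr : List Int) (n : Int) : Prop := arr ≠ []
instance (arr : List Int) (n : Int) : Decidable (Pre_LargButMinFreq arr n) := by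
  unfold Pre_LargButMinFreq; infer_instance
def pvWitness_LargButMinFreq : List Int × Int := ([3, 1, 2, 1], 4)

def Spec_LargButMinFreq (arr : List Int) (n : Int) (out : Int) : Prop := out = LargButMinFreq_alt arr n
instance (arr : List Int) (n : Int) (out : Int) : Decidable (Spec_LargButMinFreq arr n out) := by
  unfold Spec_LargButMinFreq; infer_instance

-- ===== CLAIM (what is proved, stated in full; the proofs are below) =====
def Claim_equal_LargButMinFreq : Prop := ∀ (arr : List Int) (n : Int), Dom_LargButMinFreq arr n → Pre_LargButMinFreq arr n → Spec_LargButMinFreq arr n (LargButMinFreq arr n)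

-- ===== LEMMAS AND PROOFS =====

-- A's counting loop builds exactly the counter dict.
theorem dictA_eq_counter (arr : List Int) :
    arr.foldl (fun d i => if d.contains i then d.modify i 0 (· + 1) else d.insert i 1)
      (PySem.Dict.empty : PySem.Dict Int Int) = PySem.Dict.counter arr := by
  rw [PySem.Dict.counter_eq_foldl]
  congr 1
  funext d i
  by_cases h : d.contains i = true
  · simp [h]
  · simp only [Bool.not_eq_true] at h
    simp only [h, if_false, Bool.false_eq_true, PySem.Dict.modify,
      PySem.Dict.getD_of_not_contains _ _ h]
    norm_num

-- characterisation of A's final max-scan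
theorem foldA_char (P : Int → Bool) (l : List Int) (m0 : Int) :
    (l.foldl (fun m i => if P i then (if m < i then i else m) else m) m0 = m0 ∨
      (l.foldl (fun m i => if P i then (if m < i then i else m) else m) m0 ∈ l ∧
        P (l.foldl (fun m i => if P i then (if m < i then i else m) else m) m0) = true)) ∧
    m0 ≤ l.foldl (fun m i => if P i then (if m < i then i else m) else m) m0 ∧
    ∀ i ∈ l, P i = true →
      i ≤ l.foldl (fun m i => if P i then (if m < i then i else m) else m) m0 := by
  induction l generalizing m0 with
  | nil => simp
  | cons x t ih =>
    simp only [List.foldl_cons]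
    obtain ⟨h1, h2, h3⟩ := ih (if P x then (if m0 < x then x else m0) else m0)
    refine ⟨?_, ?_, ?_⟩
    · rcases h1 with h1 | h1
      · rw [h1]
        split_ifs with hp hlt
        · exact Or.inr ⟨List.mem_cons_self, hp⟩
        · exact Or.inl rfl
        · exact Or.inl rfl
      · exact Or.inr ⟨List.mem_cons_of_mem _ h1.1, h1.2⟩
    · refine le_trans ?_ h2
      split_ifs <;> omega
    · intro i hi hp
      rcases List.mem_cons.mp hi with rfl | hi
      · refine le_trans ?_ h2
        simp only [hp, if_true]
        split_ifs <;> omega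
      · exact h3 i hi hp

-- membership in the counter's items
theorem mem_items_counter (arr : List Int) (p : Int × Int) :
    p ∈ (PySem.Dict.counter arr).items ↔ p.1 ∈ arr ∧ p.2 = (arr.count p.1 : Int) := by
  rw [PySem.Dict.items_counter]
  simp only [List.mem_map]
  constructor
  · rintro ⟨x, hx, rfl⟩
    exact ⟨(PySem.Set.mem_ofList arr x).mp hx, rfl⟩
  · rintro ⟨h1, h2⟩
    exact ⟨p.1, (PySem.Set.mem_ofList arr p.1).mpr h1, by rw [← h2]⟩

-- t splits as (replicate (countRun v t) v) ++ (t.drop (countRun v t)), the drop not starting with v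
theorem countRun_split (v : Int) (t : List Int) :
    t = List.replicate (countRun v t) v ++ t.drop (countRun v t) ∧
      ∀ y ∈ (t.drop (countRun v t)).head?, y ≠ v := by
  induction t with
  | nil => simp [countRun]
  | cons x t ih =>
    by_cases hx : x = v
    · subst hx
      simp only [countRun, beq_self_eq_true, if_true, List.replicate_succ,
        List.drop_succ_cons, List.cons_append]
      exact ⟨congrArg (x :: ·) ih.1, ih.2⟩
    · simp [countRun, hx]

theorem count_eq_of_split {v : Int} {t rest : List Int} {c : Nat}
    (hsplit : t = List.replicate c v ++ rest) (x : Int) :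
    (v :: t).count x = (if x = v then c + 1 else 0) + rest.count x := by
  subst hsplit
  by_cases hx : x = v
  · subst hx
    simp [List.count_cons, List.count_append, List.count_replicate]
    omega
  · simp [List.count_cons, List.count_append, List.count_replicate, hx, Ne.symm hx]

-- the main invariant of B's run scan on a sorted list
theorem scanB_spec : ∀ (N : Nat) (s : List Int), s.length ≤ N →
    s.Pairwise (· ≤ ·) → ∀ (best : Option (Int × Int)),
    (∀ b, best = some b → ∀ x ∈ s, b.1 < x) →
    (s ≠ [] ∨ best ≠ none) →
    ∃ r, scanB s best = some r ∧
      (best = some r ∨ (r.1 ∈ s ∧ r.2 = (s.count r.1 : Int))) ∧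
      (∀ b, best = some b → r.2 ≤ b.2 ∧ (b.2 = r.2 → b.1 ≤ r.1)) ∧
      (∀ x ∈ s, r.2 ≤ (s.count x : Int) ∧ ((s.count x : Int) = r.2 → x ≤ r.1)) := by
  intro N
  induction N with
  | zero =>
    intro s hlen _ best hb hne
    have hs : s = [] := List.eq_nil_of_length_eq_zero (by omega)
    subst hs
    rcases hne with h | h
    · exact absurd rfl h
    · rcases best with _ | b
      · exact absurd rfl h
      · exact ⟨b, by simp [scanB], Or.inl rfl,
          fun b' hb' => by cases hb'; exact ⟨le_refl _, fun _ => le_refl _⟩, by simp⟩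
  | succ N ih =>
    intro s hlen hsort best hb hne
    rcases s with _ | ⟨v, t⟩
    · rcases hne with h | h
      · exact absurd rfl h
      · rcases best with _ | b
        · exact absurd rfl h
        · exact ⟨b, by simp [scanB], Or.inl rfl,
            fun b' hb' => by cases hb'; exact ⟨le_refl _, fun _ => le_refl _⟩, by simp⟩
    · -- one run of v
      obtain ⟨hsplit, hhd⟩ := countRun_split v t
      set c := countRun v t with hc
      set rest := t.drop c with hrest
      -- all elements of rest are > v
      have hvle : ∀ x ∈ t, v ≤ x := by
        intro x hx; exact (List.pairwise_cons.mp hsort).1 x hx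
      have hrest_sub : ∀ x ∈ rest, x ∈ t := fun x hx => by
        rw [hrest] at hx; exact List.mem_of_mem_drop hx
      have hrest_sort : rest.Pairwise (· ≤ ·) := by
        have := (List.pairwise_cons.mp hsort).2
        rw [hrest]; exact this.drop
      have hrest_gt : ∀ x ∈ rest, v < x := by
        intro x hx
        rcases rest with _ | ⟨y, rt⟩
        · exact absurd hx (List.not_mem_nil)
        · have hyv : y ≠ v := hhd y rfl
          have hy_le : v ≤ y := hvle y (hrest_sub y List.mem_cons_self)
          rcases List.mem_cons.mp hx with rfl | hx
          · omega
          · have : y ≤ x := (List.pairwise_cons.mp hrest_sort).1 x hx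
            omega
      have hcount := count_eq_of_split hsplit
      have hcount_v : (v :: t).count v = c + 1 := by
        have h0 : rest.count v = 0 := by
          rw [List.count_eq_zero]
          intro h; exact absurd (hrest_gt v h) (lt_irrefl v)
        rw [hcount v, if_pos rfl, h0]
      have hcount_ne : ∀ x, x ≠ v → (v :: t).count x = rest.count x := by
        intro x hx; rw [hcount x, if_neg hx]; omega
      -- unfold one step of scanB; case on the incoming best first
      have hc1 : (((c : Nat) + 1 : Nat) : Int) = ((1 + c : Nat) : Int) := by push_cast; ring
      have hlen' : rest.length ≤ N := by
        have : rest.length ≤ t.length := by rw [hrest]; simpa using List.length_drop_le _ _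
        simp only [List.length_cons] at hlen; omega
      rcases best with _ | q
      · -- best = none: best' = some (v, run)
        have hdrop : List.drop (1 + c) (v :: t) = rest := by
          rw [Nat.add_comm, List.drop_succ_cons, hrest]
        have hstep : scanB (v :: t) none = scanB rest (some (v, ((1 + c : Nat) : Int))) := by
          simp only [scanB]
          rw [← hc, hdrop]
        obtain ⟨r, hreq, hrmem, hrbest, hrall⟩ :=
          ih rest hlen' hrest_sort (some (v, ((1 + c : Nat) : Int)))
            (by rintro b hb' x hx; cases hb'; exact hrest_gt x hx) (Or.inr (by simp))
        have hfacts := hrbest (v, ((1 + c : Nat) : Int)) rfl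
        refine ⟨r, by rw [hstep, hreq], ?_, by intro b hbeq; simp at hbeq, ?_⟩
        · rcases hrmem with hmem | ⟨hm1, hm2⟩
          · cases hmem
            refine Or.inr ⟨List.mem_cons_self, ?_⟩
            rw [hcount_v, hc1]
          · refine Or.inr ⟨List.mem_cons_of_mem _ (hrest_sub _ hm1), ?_⟩
            rw [hcount_ne r.1 (by intro h; rw [h] at hm1; exact absurd (hrest_gt v hm1) (lt_irrefl v)), hm2]
        · intro x hx
          by_cases hxv : x = v
          · subst hxv
            rw [hcount_v, hc1]
            exact hfacts
          · have hx_rest : x ∈ rest := by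
              rcases List.mem_cons.mp hx with h | h
              · exact absurd h hxv
              · rw [hsplit] at h
                rcases List.mem_append.mp h with h | h
                · exact absurd (List.eq_of_mem_replicate h) hxv
                · exact h
            rw [hcount_ne x hxv]
            exact hrall x hx_rest
      · -- best = some q
        by_cases hcmp : ((1 + c : Nat) : Int) ≤ q.2
        · -- update: best' = some (v, run)
          have hdrop : List.drop (1 + c) (v :: t) = rest := by
            rw [Nat.add_comm, List.drop_succ_cons, hrest]
          have hstep : scanB (v :: t) (some q) = scanB rest (some (v, ((1 + c : Nat) : Int))) := by
            simp only [scanB]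
            rw [← hc, if_pos hcmp, hdrop]
          obtain ⟨r, hreq, hrmem, hrbest, hrall⟩ :=
            ih rest hlen' hrest_sort (some (v, ((1 + c : Nat) : Int)))
              (by rintro b hb' x hx; cases hb'; exact hrest_gt x hx) (Or.inr (by simp))
          have hfacts := hrbest (v, ((1 + c : Nat) : Int)) rfl
          refine ⟨r, by rw [hstep, hreq], ?_, ?_, ?_⟩
          · rcases hrmem with hmem | ⟨hm1, hm2⟩
            · cases hmem
              refine Or.inr ⟨List.mem_cons_self, ?_⟩
              rw [hcount_v, hc1]
            · refine Or.inr ⟨List.mem_cons_of_mem _ (hrest_sub _ hm1), ?_⟩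
              rw [hcount_ne r.1 (by intro h; rw [h] at hm1; exact absurd (hrest_gt v hm1) (lt_irrefl v)), hm2]
          · intro b hbeq
            injection hbeq with hbq
            subst hbq
            refine ⟨le_trans hfacts.1 hcmp, fun hb2 => ?_⟩
            have hrun_eq : ((1 + c : Nat) : Int) = r.2 := by
              have := hfacts.1; omega
            have hvle' : v ≤ r.1 := hfacts.2 hrun_eq
            have : q.1 < v := hb q rfl v List.mem_cons_self
            omega
          · intro x hx
            by_cases hxv : x = v
            · subst hxv
              rw [hcount_v, hc1]
              exact hfacts
            · have hx_rest : x ∈ rest := by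
                rcases List.mem_cons.mp hx with h | h
                · exact absurd h hxv
                · rw [hsplit] at h
                  rcases List.mem_append.mp h with h | h
                  · exact absurd (List.eq_of_mem_replicate h) hxv
                  · exact h
              rw [hcount_ne x hxv]
              exact hrall x hx_rest
        · -- keep: best' = some q
          have hdrop : List.drop (1 + c) (v :: t) = rest := by
            rw [Nat.add_comm, List.drop_succ_cons, hrest]
          have hstep : scanB (v :: t) (some q) = scanB rest (some q) := by
            simp only [scanB]
            rw [← hc, if_neg hcmp, hdrop]
          obtain ⟨r, hreq, hrmem, hrbest, hrall⟩ :=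
            ih rest hlen' hrest_sort (some q)
              (by intro b hb' x hx
                  injection hb' with hbq
                  subst hbq
                  exact hb q rfl x (List.mem_cons_of_mem _ (hrest_sub x hx)))
              (Or.inr (by simp))
          have hfacts := hrbest q rfl
          refine ⟨r, by rw [hstep, hreq], ?_,
            by intro b hbeq; injection hbeq with hbq; subst hbq; exact hfacts, ?_⟩
          · rcases hrmem with hmem | ⟨hm1, hm2⟩
            · exact Or.inl hmem
            · refine Or.inr ⟨List.mem_cons_of_mem _ (hrest_sub _ hm1), ?_⟩
              rw [hcount_ne r.1 (by intro h; rw [h] at hm1; exact absurd (hrest_gt v hm1) (lt_irrefl v)), hm2]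
          · intro x hx
            by_cases hxv : x = v
            · subst hxv
              rw [hcount_v, hc1]
              have h1 : r.2 ≤ q.2 := hfacts.1
              exact ⟨by omega, fun h => by omega⟩
            · have hx_rest : x ∈ rest := by
                rcases List.mem_cons.mp hx with h | h
                · exact absurd h hxv
                · rw [hsplit] at h
                  rcases List.mem_append.mp h with h | h
                  · exact absurd (List.eq_of_mem_replicate h) hxv
                  · exact h
              rw [hcount_ne x hxv]
              exact hrall x hx_rest

-- ===== VERDICT (by name: the statement is the Claim_ definition above) =====
theorem LargButMinFreq_spec : Claim_equal_LargButMinFreq := by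
  intro arr n _hdom hpre
  unfold Spec_LargButMinFreq
  unfold Pre_LargButMinFreq at hpre
  -- reduce A
  rcases hmax : PySem.List.max? arr (fun v => v) with _ | m
  · exact absurd ((PySem.List.max?_eq_none_iff arr _).mp hmax) hpre
  rcases hmin : PySem.List.min? arr (fun v => v) with _ | m1
  · exact absurd ((PySem.List.min?_eq_none_iff arr _).mp hmin) hpre
  have hvne : (PySem.Dict.counter arr).values ≠ [] := by
    intro hv
    rcases List.exists_mem_of_ne_nil arr hpre with ⟨a, ha⟩
    have hpm : (a, (arr.count a : Int)) ∈ (PySem.Dict.counter arr).items :=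
      (mem_items_counter arr _).mpr ⟨ha, rfl⟩
    have : ((a, (arr.count a : Int)) : Int × Int).2 ∈ (PySem.Dict.counter arr).values := by
      simp only [PySem.Dict.values]
      exact List.mem_map_of_mem hpm
    rw [hv] at this
    exact absurd this (List.not_mem_nil)
  rcases hk : PySem.List.min? (PySem.Dict.counter arr).values (fun v => v) with _ | k
  · exact absurd ((PySem.List.min?_eq_none_iff _ _).mp hk) hvne
  -- facts about k
  have hkmem : k ∈ (PySem.Dict.counter arr).values := PySem.List.min?_mem hk
  have hkmin : ∀ v ∈ (PySem.Dict.counter arr).values, k ≤ v := by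
    intro v hv; exact PySem.List.min?_isMin hk v hv
  have hk_ex : ∃ x0, x0 ∈ arr ∧ (arr.count x0 : Int) = k := by
    simp only [PySem.Dict.values, List.mem_map] at hkmem
    rcases hkmem with ⟨p, hp, hpk⟩
    rcases (mem_items_counter arr p).mp hp with ⟨h1, h2⟩
    exact ⟨p.1, h1, by rw [← h2, hpk]⟩
  have hk_min : ∀ x ∈ arr, k ≤ (arr.count x : Int) := by
    intro x hx
    refine hkmin _ ?_
    simp only [PySem.Dict.values]
    exact List.mem_map_of_mem ((mem_items_counter arr (x, (arr.count x : Int))).mpr ⟨hx, rfl⟩)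
  -- reduce the A side to the final scan over arr
  have hAeq : LargButMinFreq arr n =
      arr.foldl (fun m1 i => if ((arr.count i : Int) == k) then (if m1 < i then i else m1) else m1) m1 := by
    simp only [LargButMinFreq, hmax, hmin]
    rw [dictA_eq_counter, hk]
    simp only [PySem.Dict.getD_counter]
  -- reduce the B side via the run-scan invariant
  set s := PySem.List.sorted arr (fun x => x) false with hs
  have hperm : s.Perm arr := PySem.List.sorted_perm arr (fun x => x) false
  have hsne : s ≠ [] := by
    intro h
    rw [h] at hperm
    exact hpre (List.perm_nil.mp hperm.symm)
  have hsort : s.Pairwise (· ≤ ·) := PySem.List.sorted_pairwise arr (fun x => x)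
  obtain ⟨r, hreq, hrmem, _, hrall⟩ :=
    scanB_spec s.length s (le_refl _) hsort none (by simp) (Or.inl hsne)
  have hBeq : LargButMinFreq_alt arr n = r.1 := by
    simp only [LargButMinFreq_alt, ← hs, hreq]
  rcases hrmem with h | ⟨hr1, hr2⟩
  · exact absurd h (by simp)
  -- translate B's facts from s to arr
  have hr1a : r.1 ∈ arr := hperm.mem_iff.mp hr1
  have hcount_eq : ∀ x, s.count x = arr.count x := fun x => hperm.count_eq x
  have hr2a : r.2 = (arr.count r.1 : Int) := by rw [hr2, hcount_eq]
  have hrall_a : ∀ x ∈ arr, r.2 ≤ (arr.count x : Int) ∧ ((arr.count x : Int) = r.2 → x ≤ r.1) := by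
    intro x hx
    have := hrall x (hperm.mem_iff.mpr hx)
    rwa [hcount_eq] at this
  -- k = r.2
  have hk_r : r.2 = k := by
    rcases hk_ex with ⟨x0, hx0, hx0k⟩
    have h1 : k ≤ r.2 := hr2a ▸ hk_min r.1 hr1a
    have h2 : r.2 ≤ (arr.count x0 : Int) := (hrall_a x0 hx0).1
    omega
  -- characterise A's scan
  obtain ⟨hA1, hA2, hA3⟩ := foldA_char (fun i => ((arr.count i : Int) == k)) arr m1
  rw [hAeq, hBeq]
  set rA := arr.foldl (fun m1 i => if ((arr.count i : Int) == k) then (if m1 < i then i else m1) else m1) m1 with hrA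
  have hub : r.1 ≤ rA := by
    refine hA3 r.1 hr1a ?_
    rw [beq_iff_eq, ← hr2a, hk_r]
  have hlb : rA ≤ r.1 := by
    rcases hA1 with h | ⟨hmem, hPk⟩
    · rw [h]
      exact PySem.List.min?_isMin hmin r.1 hr1a
    · rw [beq_iff_eq] at hPk
      exact (hrall_a rA hmem).2 (by rw [hPk, ← hk_r])
  omega
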